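-- pv_equiv track=rewrite | github.com/andrej-a-tristan/virtualfr | backend/app/services/behavior_engine/repair.py | _limit_questions
-- ===== SOURCE A (Python) =====
-- def _limit_questions(text: str, max_questions: int, suppress_end_question: bool) -> str:
--     if not text:
--         return text
--     if max_questions < 0:
--         max_questions = 0
--     q_seen = 0
--     chars: list[str] = []
--     for ch in text:
--         if ch == "?":
--             if q_seen < max_questions:
--                 chars.append("?")
--             else:
--                 chars.append(".")
--             q_seen += 1
--         else:
--             chars.append(ch)
--     out = "".join(chars)
--     if suppress_end_question:
--         out = out.rstrip()
--         if out.endswith("?"):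
--             out = out[:-1] + "."
--     return out
-- ===== SOURCE B (Python) =====
-- def _limit_questions(text: str, max_questions: int, suppress_end_question: bool) -> str:
--     if not text:
--         return text
--     max_questions = max(0, max_questions)
--     parts = text.split("?")
--     out = parts[0]
--     for i, part in enumerate(parts[1:]):
--         out += ("?" if i < max_questions else ".") + part
--     if suppress_end_question:
--         out = out.rstrip()
--         if out.endswith("?"):
--             out = out[:-1] + "."
--     return out
-- ===== Notes on version B (the rewrite author's own statement) =====
-- stated objective: faster
-- what changed: Replaced the per-character loop with a q_seen counter and branch by text.split('?') followed by rejoining with '?' for the first max_questions separators and '.' for the rest; the counter and character-level branching disappear.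
import Mathlib
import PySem

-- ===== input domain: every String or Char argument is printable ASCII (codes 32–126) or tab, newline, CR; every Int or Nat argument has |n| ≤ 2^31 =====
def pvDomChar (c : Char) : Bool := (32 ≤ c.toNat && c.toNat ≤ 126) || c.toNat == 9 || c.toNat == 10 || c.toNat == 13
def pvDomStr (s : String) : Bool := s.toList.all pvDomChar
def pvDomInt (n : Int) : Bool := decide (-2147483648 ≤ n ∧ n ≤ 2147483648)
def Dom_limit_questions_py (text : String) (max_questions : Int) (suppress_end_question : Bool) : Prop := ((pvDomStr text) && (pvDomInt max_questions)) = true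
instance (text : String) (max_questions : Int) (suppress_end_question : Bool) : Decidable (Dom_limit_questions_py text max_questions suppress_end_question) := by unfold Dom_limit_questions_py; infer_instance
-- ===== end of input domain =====

-- B replaces A's per-character loop with a running counter by split-on-'?' then join with indexed separators (objective: faster by a constant factor: split/concat replace the per-character Python loop).

-- ===== PORT A =====
-- literal transliteration of A: per-character loop carrying (q_seen, chars)
def limit_questions_py (text : String) (max_questions : Int) (suppress_end_question : Bool) : String :=
  if text = "" then text
  else
    let m : Int := if max_questions < 0 then 0 else max_questions
    let st := text.toList.foldl
      (fun (st : Int × List Char) ch =>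
        if ch = '?' then (st.1 + 1, st.2 ++ [if st.1 < m then '?' else '.'])
        else (st.1, st.2 ++ [ch])) ((0 : Int), ([] : List Char))
    let out := st.2
    let out := if suppress_end_question then
        let out := PySem.Chars.rstrip out
        if PySem.Chars.endswith out ['?'] then PySem.List.slice out none (some (-1)) ++ ['.'] else out
      else out
    String.ofList out

-- ===== PORT B =====
-- literal transliteration of B: split on '?', rebuild with indexed separators.
-- parts[0] is ported as parts.headD [] (str.split always returns at least one part, so this is exact).
def limit_questions_py_alt (text : String) (max_questions : Int) (suppress_end_question : Bool) : String :=
  if text = "" then text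
  else
    let m : Int := max 0 max_questions
    let parts := PySem.Chars.splitOn text.toList ['?']
    let out := (PySem.List.enumerate (parts.drop 1)).foldl
      (fun acc ip => acc ++ (if ip.1 < m then ['?'] else ['.']) ++ ip.2) (parts.headD [])
    let out := if suppress_end_question then
        let out := PySem.Chars.rstrip out
        if PySem.Chars.endswith out ['?'] then PySem.List.slice out none (some (-1)) ++ ['.'] else out
      else out
    String.ofList out

-- ===== PRECONDITION & SPEC =====
def Spec_limit_questions_py (text : String) (max_questions : Int) (suppress_end_question : Bool) (out : String) : Prop := out = limit_questions_py_alt text max_questions suppress_end_question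
instance (text : String) (max_questions : Int) (suppress_end_question : Bool) (out : String) : Decidable (Spec_limit_questions_py text max_questions suppress_end_question out) := by unfold Spec_limit_questions_py; infer_instance

-- ===== CLAIM (what is proved, stated in full; the proofs are below) =====
def Claim_equal_limit_questions_py : Prop := ∀ (text : String) (max_questions : Int) (suppress_end_question : Bool), Dom_limit_questions_py text max_questions suppress_end_question → Spec_limit_questions_py text max_questions suppress_end_question (limit_questions_py text max_questions suppress_end_question)

-- ===== LEMMAS AND PROOFS =====

-- reference result of the character loop, starting with q questions already seen
def pvRef (m q : Int) : List Char → List Char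
  | [] => []
  | c :: rest => if c = '?' then (if q < m then '?' else '.') :: pvRef m (q + 1) rest
                 else c :: pvRef m q rest

-- structural recursion computing split-on-'?'
def pvSplit : List Char → List (List Char)
  | [] => [[]]
  | c :: rest => if c = '?' then [] :: pvSplit rest
                 else (c :: (pvSplit rest).headD []) :: (pvSplit rest).tail

-- the separators-then-parts tail of B's rebuild, starting at index q
def pvJoin (m q : Int) : List (List Char) → List Char
  | [] => []
  | p :: ps => (if q < m then '?' else '.') :: (p ++ pvJoin m (q + 1) ps)

theorem pvSplit_cons_structure (cs : List Char) :
    pvSplit cs = (pvSplit cs).headD [] :: (pvSplit cs).tail := by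
  cases cs with
  | nil => simp [pvSplit]
  | cons c rest => simp only [pvSplit]; split <;> simp

theorem pv_foldA (m : Int) :
    ∀ (cs : List Char) (q : Int) (acc : List Char),
      (cs.foldl (fun (st : Int × List Char) ch =>
          if ch = '?' then (st.1 + 1, st.2 ++ [if st.1 < m then '?' else '.'])
          else (st.1, st.2 ++ [ch])) (q, acc)).2 = acc ++ pvRef m q cs := by
  intro cs
  induction cs with
  | nil => intro q acc; simp [pvRef]
  | cons c rest ih =>
    intro q acc
    by_cases hc : c = '?'
    · by_cases hq : q < m <;>
        simp [List.foldl_cons, hc, hq, pvRef, ih]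
    · simp [List.foldl_cons, hc, pvRef, ih]

theorem pv_go_spec :
    ∀ (cs : List Char) (fuel : Nat) (cur : List Char) (acc : List (List Char)),
      cs.length < fuel →
      PySem.Chars.splitOn.go ['?'] fuel cs cur acc
        = acc.reverse ++ (cur.reverse ++ (pvSplit cs).headD []) :: (pvSplit cs).tail := by
  intro cs
  induction cs with
  | nil =>
    intro fuel cur acc h
    cases fuel with
    | zero => omega
    | succ f => simp [PySem.Chars.splitOn.go, pvSplit]
  | cons c rest ih =>
    intro fuel cur acc h
    cases fuel with
    | zero => simp at h
    | succ f =>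
      by_cases hc : c = '?'
      · have : PySem.Chars.splitOn.go ['?'] (f + 1) (c :: rest) cur acc
            = PySem.Chars.splitOn.go ['?'] f rest [] (cur.reverse :: acc) := by
          simp [PySem.Chars.splitOn.go, List.isPrefixOf, hc]
        rw [this, ih f [] (cur.reverse :: acc) (by simpa using h)]
        simp only [pvSplit, if_pos hc]
        rw [pvSplit_cons_structure rest]
        simp
      · have : PySem.Chars.splitOn.go ['?'] (f + 1) (c :: rest) cur acc
            = PySem.Chars.splitOn.go ['?'] f rest (c :: cur) acc := by
          simp [PySem.Chars.splitOn.go, List.isPrefixOf]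
          intro h'; exact absurd h'.symm hc
        rw [this, ih f (c :: cur) acc (by simpa using h)]
        simp [pvSplit, hc]

theorem pv_splitOn_eq (cs : List Char) :
    PySem.Chars.splitOn cs ['?'] = pvSplit cs := by
  unfold PySem.Chars.splitOn
  rw [pv_go_spec cs (cs.length + 1) [] [] (by omega)]
  simpa using (pvSplit_cons_structure cs).symm

theorem pv_foldB (m : Int) :
    ∀ (ps : List (List Char)) (q : Int) (acc : List Char),
      (PySem.List.enumerate ps q).foldl
          (fun acc ip => acc ++ (if ip.1 < m then ['?'] else ['.']) ++ ip.2) acc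
        = acc ++ pvJoin m q ps := by
  intro ps
  induction ps with
  | nil => intro q acc; simp [PySem.List.enumerate, pvJoin]
  | cons p rest ih =>
    intro q acc
    rw [show PySem.List.enumerate (p :: rest) q = (q, p) :: PySem.List.enumerate rest (q + 1) from
      by simp [PySem.List.enumerate]]
    rw [List.foldl_cons, ih]
    by_cases hq : q < m <;> simp [pvJoin, hq]

theorem pv_glue (m : Int) :
    ∀ (cs : List Char) (q : Int),
      (pvSplit cs).headD [] ++ pvJoin m q (pvSplit cs).tail = pvRef m q cs := by
  intro cs
  induction cs with
  | nil => intro q; simp [pvSplit, pvJoin, pvRef]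
  | cons c rest ih =>
    intro q
    by_cases hc : c = '?'
    · simp only [pvSplit, if_pos hc, pvRef]
      rw [pvSplit_cons_structure rest]
      by_cases hq : q < m <;> simp [pvJoin, hq, ← ih (q + 1)]

    · simp only [pvSplit, pvRef, if_neg hc]
      simp [← ih q]

-- ===== VERDICT (by name: the statement is the Claim_ definition above) =====
theorem limit_questions_py_spec : Claim_equal_limit_questions_py := by
  intro text mq sup _
  unfold Spec_limit_questions_py limit_questions_py limit_questions_py_alt
  by_cases ht : text = ""
  · simp [ht]
  · simp only [ht, ite_false]
    have hm : (if mq < 0 then (0 : Int) else mq) = max 0 mq := by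
      split <;> omega
    rw [hm]
    rw [pv_foldA (max 0 mq) text.toList 0 [], pv_foldB (max 0 mq), pv_splitOn_eq,
      List.drop_one, pv_glue (max 0 mq) text.toList 0]
    simp
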